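-- pv_equiv track=rewrite | github.com/KhronosGroup/NNEF-Tools | nnef_tools-pyproject/nnef_tools/interpreter/pytorch/nnef_operators.py | _get_transform_for_box_or_max_pool
-- ===== SOURCE A (Python) =====
-- def _inverse_permutation(perm):
--     inverse = [0] * len(perm)
--     for i, p in enumerate(perm):
--         inverse[p] = i
--     return inverse
--
-- def _get_transform_for_box_or_max_pool(input_shape, active):
--     # type: (List[int], List[bool])->Any
--     assert len(input_shape) >= 3
--     assert len(input_shape) == len(active)
--     assert sum(active) <= 3, \
--         "Sliding window operations are not supported if they have more than 3 'active' dimensions; got {}".format(sum(active))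
--
--     if 3 <= len(input_shape) <= 5 and not active[0] and not active[1]:  # Direct support
--         return None, None, None, None
--     else:
--         inactive_dims = [i for i, a in enumerate(active) if not a]
--         active_dims = [i for i, a in enumerate(active) if a]
--         inactive_shape = [s for i, s in enumerate(input_shape) if i not in active_dims]
--         active_shape = [s for i, s in enumerate(input_shape) if i in active_dims]
--         perm = inactive_dims + active_dims
--         perm_inv = _inverse_permutation(perm)
--     return perm, perm_inv, inactive_shape, active_shape
-- ===== SOURCE B (Python) =====
-- def _get_transform_for_box_or_max_pool(input_shape, active):
--     # type: (List[int], List[bool])->Any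
--     assert len(input_shape) >= 3
--     assert len(input_shape) == len(active)
--     assert sum(active) <= 3, \
--         "Sliding window operations are not supported if they have more than 3 'active' dimensions; got {}".format(sum(active))
--
--     if 3 <= len(input_shape) <= 5 and not active[0] and not active[1]:  # Direct support
--         return None, None, None, None
--
--     # sort-then-gather: a stable sort of the axis indices by the active flag
--     # (False < True) puts the inactive axes first, each group in original order,
--     # which IS the desired permutation; the rest is gathered through it.
--     n = len(active)
--     perm = sorted(range(n), key=lambda i: active[i])
--     perm_inv = [perm.index(j) for j in range(n)]
--     shapes = [input_shape[p] for p in perm]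
--     k = n - sum(active)
--     return perm, perm_inv, shapes[:k], shapes[k:]
-- ===== Notes on version B (the rewrite author's own statement) =====
-- stated objective: alternative
-- what changed: Replaces A's four partition comprehensions (with an 'i in active_dims' membership scan) and scatter-style inverse loop by sort-then-gather: perm is a stable sort of range(n) keyed on the active flag, perm_inv is gathered with perm.index, and both shape lists come from one gather through perm followed by two slices.
import Mathlib
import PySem

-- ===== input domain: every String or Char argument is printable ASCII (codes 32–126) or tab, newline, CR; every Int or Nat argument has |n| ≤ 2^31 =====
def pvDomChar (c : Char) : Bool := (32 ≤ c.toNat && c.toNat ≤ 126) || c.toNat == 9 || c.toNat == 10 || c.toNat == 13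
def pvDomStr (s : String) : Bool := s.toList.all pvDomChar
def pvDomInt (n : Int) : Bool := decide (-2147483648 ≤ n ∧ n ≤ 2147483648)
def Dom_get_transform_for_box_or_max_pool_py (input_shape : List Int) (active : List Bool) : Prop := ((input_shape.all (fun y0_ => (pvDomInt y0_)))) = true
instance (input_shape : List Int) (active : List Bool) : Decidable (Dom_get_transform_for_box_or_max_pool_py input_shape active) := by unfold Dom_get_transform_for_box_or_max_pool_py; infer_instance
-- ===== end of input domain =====

-- B replaces A's four partition comprehensions and scatter-style inverse loop by sort-then-gather:
-- perm = stable sort of range(n) keyed on the active flag, perm_inv gathered with perm.index,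
-- shapes gathered through perm and split by two slices (objective: alternative algorithm, same result).

-- ===== PORT A =====
-- helper _inverse_permutation (A keeps it as a helper)
def pvInvPermA (perm : List Int) : List Int :=
  (PySem.List.enumerate perm 0).foldl
    (fun inv pr => PySem.List.pySetD inv pr.2 pr.1)
    (List.replicate perm.length 0)

def get_transform_for_box_or_max_pool_py (input_shape : List Int) (active : List Bool) : Option (List Int) × Option (List Int) × Option (List Int) × Option (List Int) :=
  if 3 ≤ input_shape.length ∧ input_shape.length ≤ 5 ∧
     PySem.List.pyGetD active 0 false = false ∧ PySem.List.pyGetD active 1 false = false then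
    (none, none, none, none)
  else
    let inactive_dims := ((PySem.List.enumerate active 0).filter (fun p => !p.2)).map (·.1)
    let active_dims := ((PySem.List.enumerate active 0).filter (fun p => p.2)).map (·.1)
    let inactive_shape := ((PySem.List.enumerate input_shape 0).filter (fun p => !(active_dims.contains p.1))).map (·.2)
    let active_shape := ((PySem.List.enumerate input_shape 0).filter (fun p => active_dims.contains p.1)).map (·.2)
    let perm := inactive_dims ++ active_dims
    let perm_inv := pvInvPermA perm
    (some perm, some perm_inv, some inactive_shape, some active_shape)

-- ===== PORT B =====
def get_transform_for_box_or_max_pool_py_alt (input_shape : List Int) (active : List Bool) : Option (List Int) × Option (List Int) × Option (List Int) × Option (List Int) :=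
  if 3 ≤ input_shape.length ∧ input_shape.length ≤ 5 ∧
     PySem.List.pyGetD active 0 false = false ∧ PySem.List.pyGetD active 1 false = false then
    (none, none, none, none)
  else
    let n : Int := active.length
    -- perm = sorted(range(n), key=lambda i: active[i])  (pyGetD is exact: i ranges over 0..n-1)
    let perm := PySem.List.sorted (PySem.List.pyRange 0 n 1) (fun i => PySem.List.pyGetD active i false) false
    -- perm_inv = [perm.index(j) for j in range(n)]  (.getD 0 is exact: every j < n occurs in perm)
    let perm_inv := (PySem.List.pyRange 0 n 1).map (fun j => (((PySem.List.index? perm j).getD 0 : Nat) : Int))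
    -- shapes = [input_shape[p] for p in perm]  (pyGetD exact: p in range)
    let shapes := perm.map (fun p => PySem.List.pyGetD input_shape p 0)
    let k : Int := n - (active.map (fun a => if a then (1 : Int) else 0)).sum
    (some perm, some perm_inv, some (PySem.List.slice shapes none (some k)), some (PySem.List.slice shapes (some k) none))

-- ===== PRECONDITION & SPEC =====
-- Pre_ excludes exactly the inputs on which A's three asserts raise AssertionError:
-- len(input_shape) < 3, len(input_shape) != len(active), or more than 3 active dimensions.
def Pre_get_transform_for_box_or_max_pool_py (input_shape : List Int) (active : List Bool) : Prop :=
  3 ≤ input_shape.length ∧ input_shape.length = active.length ∧ active.count true ≤ 3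
instance (input_shape : List Int) (active : List Bool) : Decidable (Pre_get_transform_for_box_or_max_pool_py input_shape active) := by unfold Pre_get_transform_for_box_or_max_pool_py; infer_instance

def pvWitness_get_transform_for_box_or_max_pool_py : List Int × List Bool := ([2, 3, 4], [true, false, false])

def Spec_get_transform_for_box_or_max_pool_py (input_shape : List Int) (active : List Bool) (out : Option (List Int) × Option (List Int) × Option (List Int) × Option (List Int)) : Prop := out = get_transform_for_box_or_max_pool_py_alt input_shape active
instance (input_shape : List Int) (active : List Bool) (out : Option (List Int) × Option (List Int) × Option (List Int) × Option (List Int)) : Decidable (Spec_get_transform_for_box_or_max_pool_py input_shape active out) := by unfold Spec_get_transform_for_box_or_max_pool_py; infer_instance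

-- ===== CLAIM (what is proved, stated in full; the proofs are below) =====
def Claim_equal_get_transform_for_box_or_max_pool_py : Prop := ∀ (input_shape : List Int) (active : List Bool), Dom_get_transform_for_box_or_max_pool_py input_shape active → Pre_get_transform_for_box_or_max_pool_py input_shape active → Spec_get_transform_for_box_or_max_pool_py input_shape active (get_transform_for_box_or_max_pool_py input_shape active)

-- ===== LEMMAS AND PROOFS =====

-- canonical partition of (input_shape, active): (inactive_dims, active_dims, inactive_shape, active_shape)
def pvBsp : List Int → List Bool → Int → List Int × List Int × List Int × List Int
  | x :: xs, a :: t, s =>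
    let r := pvBsp xs t (s + 1)
    if a then (r.1, s :: r.2.1, r.2.2.1, x :: r.2.2.2)
    else (s :: r.1, r.2.1, x :: r.2.2.1, r.2.2.2)
  | _, _, _ => ([], [], [], [])

lemma pvBsp_nil_right (sh : List Int) (s : Int) : pvBsp sh [] s = ([], [], [], []) := by
  cases sh <;> rfl

-- A's inactive_dims comprehension equals the canonical one
lemma pvA_idims (sh : List Int) (ac : List Bool) (s : Int) (hlen : sh.length = ac.length) :
    ((PySem.List.enumerate ac s).filter (fun p => !p.2)).map (·.1) = (pvBsp sh ac s).1 := by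
  induction ac generalizing sh s with
  | nil => simp [pvBsp_nil_right, PySem.List.enumerate_nil]
  | cons a t ih =>
    cases sh with
    | nil => simp at hlen
    | cons x xs =>
      simp only [PySem.List.enumerate_cons, List.filter_cons]
      by_cases ha : a <;>
        simp [pvBsp, ha, ih xs (s + 1) (by simpa using hlen)]

-- A's active_dims comprehension equals the canonical one
lemma pvA_adims (sh : List Int) (ac : List Bool) (s : Int) (hlen : sh.length = ac.length) :
    ((PySem.List.enumerate ac s).filter (fun p => p.2)).map (·.1) = (pvBsp sh ac s).2.1 := by
  induction ac generalizing sh s with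
  | nil => simp [pvBsp_nil_right, PySem.List.enumerate_nil]
  | cons a t ih =>
    cases sh with
    | nil => simp at hlen
    | cons x xs =>
      simp only [PySem.List.enumerate_cons, List.filter_cons]
      by_cases ha : a <;>
        simp [pvBsp, ha, ih xs (s + 1) (by simpa using hlen)]

-- membership in the canonical active_dims
lemma pv_mem_adims (ac : List Bool) (sh : List Int) (s j : Int) (hlen : sh.length = ac.length) :
    j ∈ (pvBsp sh ac s).2.1 ↔ ∃ k : Nat, ∃ _ : k < ac.length, j = s + k ∧ ac[k] = true := by
  induction ac generalizing sh s with
  | nil => simp [pvBsp_nil_right]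
  | cons a t ih =>
    cases sh with
    | nil => simp at hlen
    | cons x xs =>
      have hlen' : xs.length = t.length := by simpa using hlen
      by_cases ha : a
      · subst ha
        simp only [pvBsp, if_pos, List.mem_cons, ih xs (s + 1) hlen']
        constructor
        · rintro (rfl | ⟨k, hk, rfl, hget⟩)
          · exact ⟨0, by simp, by simp, by simp⟩
          · refine ⟨k + 1, by simp only [List.length_cons]; omega, by push_cast; ring, by simpa using hget⟩
        · rintro ⟨k, hk, rfl, hget⟩
          cases k with
          | zero => left; simp
          | succ m =>
            right
            exact ⟨m, by simp only [List.length_cons] at hk; omega, by push_cast; ring,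
              by simpa using hget⟩
      · simp only [Bool.not_eq_true] at ha
        subst ha
        simp only [pvBsp, Bool.false_eq_true, if_neg, not_false_iff, ih xs (s + 1) hlen']
        constructor
        · rintro ⟨k, hk, rfl, hget⟩
          refine ⟨k + 1, by simp only [List.length_cons]; omega, by push_cast; ring, by simpa using hget⟩
        · rintro ⟨k, hk, rfl, hget⟩
          cases k with
          | zero => simp at hget
          | succ m =>
            exact ⟨m, by simp only [List.length_cons] at hk; omega, by push_cast; ring,
              by simpa using hget⟩

-- membership in the canonical inactive_dims
lemma pv_mem_idims (ac : List Bool) (sh : List Int) (s j : Int) (hlen : sh.length = ac.length) :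
    j ∈ (pvBsp sh ac s).1 ↔ ∃ k : Nat, ∃ _ : k < ac.length, j = s + k ∧ ac[k] = false := by
  induction ac generalizing sh s with
  | nil => simp [pvBsp_nil_right]
  | cons a t ih =>
    cases sh with
    | nil => simp at hlen
    | cons x xs =>
      have hlen' : xs.length = t.length := by simpa using hlen
      by_cases ha : a
      · subst ha
        simp only [pvBsp, if_pos, ih xs (s + 1) hlen']
        constructor
        · rintro ⟨k, hk, rfl, hget⟩
          refine ⟨k + 1, by simp only [List.length_cons]; omega, by push_cast; ring, by simpa using hget⟩
        · rintro ⟨k, hk, rfl, hget⟩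
          cases k with
          | zero => simp at hget
          | succ m =>
            exact ⟨m, by simp only [List.length_cons] at hk; omega, by push_cast; ring,
              by simpa using hget⟩
      · simp only [Bool.not_eq_true] at ha
        subst ha
        simp only [pvBsp, Bool.false_eq_true, if_neg, not_false_iff, List.mem_cons,
          ih xs (s + 1) hlen']
        constructor
        · rintro (rfl | ⟨k, hk, rfl, hget⟩)
          · exact ⟨0, by simp, by simp, by simp⟩
          · refine ⟨k + 1, by simp only [List.length_cons]; omega, by push_cast; ring, by simpa using hget⟩
        · rintro ⟨k, hk, rfl, hget⟩
          cases k with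
          | zero => left; simp
          | succ m =>
            right
            exact ⟨m, by simp only [List.length_cons] at hk; omega, by push_cast; ring,
              by simpa using hget⟩

lemma pv_contains_adims (ac : List Bool) (sh : List Int) (s : Int) (k : Nat)
    (hlen : sh.length = ac.length) (hk : k < ac.length) :
    ((pvBsp sh ac s).2.1.contains (s + k)) = ac[k] := by
  by_cases hget : ac[k] = true
  · simp only [hget]
    have : (s + (k : Int)) ∈ (pvBsp sh ac s).2.1 :=
      (pv_mem_adims ac sh s _ hlen).mpr ⟨k, hk, rfl, hget⟩
    simpa [List.contains_iff_mem] using this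
  · simp only [Bool.not_eq_true] at hget
    simp only [hget]
    have : (s + (k : Int)) ∉ (pvBsp sh ac s).2.1 := by
      rw [pv_mem_adims ac sh s _ hlen]
      rintro ⟨k', hk', heq, hget'⟩
      have : k' = k := by omega
      subst this
      simp [hget] at hget'
    simpa [List.contains_iff_mem] using this

-- A's shape comprehensions, driven by a predicate on the index, equal the canonical shapes
lemma pvA_ash (sh : List Int) (ac : List Bool) (s : Int) (c : Int → Bool)
    (hlen : sh.length = ac.length)
    (hc : ∀ k : Nat, k < ac.length → c (s + k) = ac[k]!) :
    ((PySem.List.enumerate sh s).filter (fun p => c p.1)).map (·.2) = (pvBsp sh ac s).2.2.2 := by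
  induction sh generalizing ac s with
  | nil => simp [PySem.List.enumerate_nil, pvBsp]
  | cons x xs ih =>
    cases ac with
    | nil => simp at hlen
    | cons a t =>
      have hlen' : xs.length = t.length := by simpa using hlen
      have h0 : c s = a := by simpa using hc 0 (by simp)
      have hc' : ∀ k : Nat, k < t.length → c (s + 1 + k) = t[k]! := by
        intro k hk
        have := hc (k + 1) (by simpa using Nat.succ_lt_succ hk)
        simpa [add_assoc, add_comm, add_left_comm] using this
      simp only [PySem.List.enumerate_cons, List.filter_cons]
      by_cases ha : a <;> simp [pvBsp, ha, h0, ih t (s + 1) hlen' hc']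

lemma pvA_ish (sh : List Int) (ac : List Bool) (s : Int) (c : Int → Bool)
    (hlen : sh.length = ac.length)
    (hc : ∀ k : Nat, k < ac.length → c (s + k) = !ac[k]!) :
    ((PySem.List.enumerate sh s).filter (fun p => c p.1)).map (·.2) = (pvBsp sh ac s).2.2.1 := by
  induction sh generalizing ac s with
  | nil => simp [PySem.List.enumerate_nil, pvBsp]
  | cons x xs ih =>
    cases ac with
    | nil => simp at hlen
    | cons a t =>
      have hlen' : xs.length = t.length := by simpa using hlen
      have h0 : c s = !a := by simpa using hc 0 (by simp)
      have hc' : ∀ k : Nat, k < t.length → c (s + 1 + k) = !t[k]! := by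
        intro k hk
        have := hc (k + 1) (by simpa using Nat.succ_lt_succ hk)
        simpa [add_assoc, add_comm, add_left_comm] using this
      simp only [PySem.List.enumerate_cons, List.filter_cons]
      by_cases ha : a <;> simp [pvBsp, ha, h0, ih t (s + 1) hlen' hc']

-- ===== B-side lemmas: stable sort by a Bool key is the partition =====

lemma pv_insert_part (c : Int → Bool) (x : Int) (F T : List Int)
    (hF : ∀ y ∈ F, c y = false) (hT : ∀ y ∈ T, c y = true) :
    PySem.List.insertBy (fun a b => decide (c a < c b)) x (F ++ T) =
      if c x then F ++ (T ++ [x]) else (F ++ [x]) ++ T := by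
  by_cases hx : c x
  · rw [if_pos hx, PySem.List.insertBy_of_forall_not_before]
    · simp
    · intro y hy
      rcases List.mem_append.mp hy with h | h
      · simp [hx, hF y h]
      · simp [hx, hT y h]
  · rw [if_neg hx]
    simp only [Bool.not_eq_true] at hx
    induction F with
    | nil =>
      cases T with
      | nil => simp [PySem.List.insertBy]
      | cons t ts => simp [PySem.List.insertBy, hx, hT t (by simp)]
    | cons f fs ih =>
      have hf : c f = false := hF f (by simp)
      simp only [List.cons_append, PySem.List.insertBy, hx, hf]
      simp only [decide_eq_true_eq]
      rw [if_neg (by simp)]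
      simp [ih (fun y hy => hF y (by simp [hy]))]

lemma pv_boolsort_fold (c : Int → Bool) (xs F T : List Int)
    (hF : ∀ y ∈ F, c y = false) (hT : ∀ y ∈ T, c y = true) :
    xs.foldl (fun acc x => PySem.List.insertBy (fun a b => decide (c a < c b)) x acc) (F ++ T)
      = (F ++ xs.filter (fun x => !c x)) ++ (T ++ xs.filter c) := by
  induction xs generalizing F T with
  | nil => simp
  | cons x t ih =>
    simp only [List.foldl_cons, List.filter_cons]
    rw [pv_insert_part c x F T hF hT]
    by_cases hx : c x
    · rw [if_pos hx]
      rw [ih F (T ++ [x]) hF (by intro y hy; rcases List.mem_append.mp hy with h | h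
                                 · exact hT y h
                                 · simp at h; simpa [h] using hx)]
      simp [hx, List.append_assoc]
    · rw [if_neg hx]
      simp only [Bool.not_eq_true] at hx
      rw [ih (F ++ [x]) T (by intro y hy; rcases List.mem_append.mp hy with h | h
                              · exact hF y h
                              · simp at h; simpa [h] using hx) hT]
      simp [hx, List.append_assoc]

lemma pv_boolsort (xs : List Int) (c : Int → Bool) :
    PySem.List.sorted xs c false = xs.filter (fun x => !c x) ++ xs.filter c := by
  rw [PySem.List.sorted_eq_foldl_insertBy]
  simpa using pv_boolsort_fold c xs [] [] (by simp) (by simp)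

-- filtering the index range by the active flag gives the canonical dims
lemma pv_range_filter (sh : List Int) (ac : List Bool) (s : Int) (c : Int → Bool)
    (hlen : sh.length = ac.length)
    (hc : ∀ k : Nat, k < ac.length → c (s + k) = ac[k]!) :
    (PySem.List.pyRange s (s + ac.length) 1).filter (fun i => !c i) = (pvBsp sh ac s).1 ∧
    (PySem.List.pyRange s (s + ac.length) 1).filter c = (pvBsp sh ac s).2.1 := by
  induction ac generalizing sh s with
  | nil => simp [pvBsp_nil_right]
  | cons a t ih =>
    cases sh with
    | nil => simp at hlen
    | cons x xs =>
      have hlen' : xs.length = t.length := by simpa using hlen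
      have h0 : c s = a := by simpa using hc 0 (by simp)
      have hc' : ∀ k : Nat, k < t.length → c (s + 1 + k) = t[k]! := by
        intro k hk
        have := hc (k + 1) (by simpa using Nat.succ_lt_succ hk)
        simpa [add_assoc, add_comm, add_left_comm] using this
      have hcons : PySem.List.pyRange s (s + ((t.length : Int) + 1)) 1
          = s :: PySem.List.pyRange (s + 1) (s + 1 + t.length) 1 := by
        rw [PySem.List.pyRange_one_cons (by omega : s < s + ((t.length : Int) + 1))]
        congr 1
        ring_nf
      have hrw : ((t.length + 1 : Nat) : Int) = (t.length : Int) + 1 := by push_cast; ring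
      obtain ⟨ih1, ih2⟩ := ih xs (s + 1) hlen' hc'
      constructor <;>
      · simp only [List.length_cons, hrw, hcons, List.filter_cons, h0]
        by_cases ha : a <;> simp [pvBsp, ha, ih1, ih2]

-- gathering through the canonical dims gives the canonical shapes
lemma pv_gather (sh : List Int) (ac : List Bool) (s : Int) (g : Int → Int)
    (hlen : sh.length = ac.length)
    (hg : ∀ k : Nat, k < ac.length → g (s + k) = sh[k]!) :
    (pvBsp sh ac s).1.map g = (pvBsp sh ac s).2.2.1 ∧
    (pvBsp sh ac s).2.1.map g = (pvBsp sh ac s).2.2.2 := by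
  induction ac generalizing sh s with
  | nil => simp [pvBsp_nil_right]
  | cons a t ih =>
    cases sh with
    | nil => simp at hlen
    | cons x xs =>
      have hlen' : xs.length = t.length := by simpa using hlen
      have h0 : g s = x := by simpa using hg 0 (by simp)
      have hg' : ∀ k : Nat, k < t.length → g (s + 1 + k) = xs[k]! := by
        intro k hk
        have := hg (k + 1) (by simpa using Nat.succ_lt_succ hk)
        simpa [add_assoc, add_comm, add_left_comm] using this
      obtain ⟨ih1, ih2⟩ := ih xs (s + 1) hlen' hg'
      by_cases ha : a <;> simp [pvBsp, ha, h0, ih1, ih2]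

-- lengths of the canonical lists
lemma pvBsp_len (sh : List Int) (ac : List Bool) (s : Int) (hlen : sh.length = ac.length) :
    (pvBsp sh ac s).1.length = ac.countP (fun a => !a) ∧
    (pvBsp sh ac s).2.1.length = ac.countP (fun a => a) ∧
    (pvBsp sh ac s).2.2.1.length = ac.countP (fun a => !a) ∧
    (pvBsp sh ac s).2.2.2.length = ac.countP (fun a => a) := by
  induction ac generalizing sh s with
  | nil => simp [pvBsp_nil_right]
  | cons a t ih =>
    cases sh with
    | nil => simp at hlen
    | cons x xs =>
      obtain ⟨i1, i2, i3, i4⟩ := ih xs (s + 1) (by simpa using hlen)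
      by_cases ha : a <;> simp [pvBsp, ha, i1, i2, i3, i4]

-- the canonical dims are strictly increasing
lemma pvBsp_pairwise (sh : List Int) (ac : List Bool) (s : Int) (hlen : sh.length = ac.length) :
    (pvBsp sh ac s).1.Pairwise (· < ·) ∧ (pvBsp sh ac s).2.1.Pairwise (· < ·) := by
  induction ac generalizing sh s with
  | nil => simp [pvBsp_nil_right]
  | cons a t ih =>
    cases sh with
    | nil => simp at hlen
    | cons x xs =>
      have hlen' : xs.length = t.length := by simpa using hlen
      obtain ⟨ih1, ih2⟩ := ih xs (s + 1) hlen'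
      have hbF : ∀ y ∈ (pvBsp xs t (s + 1)).1, s < y := by
        intro y hy
        obtain ⟨k, hk, rfl, _⟩ := (pv_mem_idims t xs (s + 1) y hlen').mp hy
        omega
      have hbT : ∀ y ∈ (pvBsp xs t (s + 1)).2.1, s < y := by
        intro y hy
        obtain ⟨k, hk, rfl, _⟩ := (pv_mem_adims t xs (s + 1) y hlen').mp hy
        omega
      by_cases ha : a
      · simp only [pvBsp, ha, if_true]
        exact ⟨ih1, List.pairwise_cons.mpr ⟨fun y hy => hbT y hy, ih2⟩⟩
      · simp only [pvBsp, ha, Bool.false_eq_true, if_false]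
        exact ⟨List.pairwise_cons.mpr ⟨fun y hy => hbF y hy, ih1⟩, ih2⟩

-- ===== scatter loop (A's _inverse_permutation) characterised =====

lemma pv_scatter_len (p : List Int) (s : Int) (inv : List Int) :
    ((PySem.List.enumerate p s).foldl (fun inv pr => PySem.List.pySetD inv pr.2 pr.1) inv).length
      = inv.length := by
  induction p generalizing s inv with
  | nil => simp [PySem.List.enumerate_nil]
  | cons x xs ih =>
    simp [PySem.List.enumerate_cons, ih, PySem.List.length_pySetD]

lemma pv_scatter_get (p : List Int) (hnd : p.Nodup) (hnn : ∀ x ∈ p, ∃ m : Nat, x = (m : Int))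
    (s : Int) (inv : List Int) (t : Nat) (ht : t < inv.length) (d : Int) :
    PySem.List.pyGetD
        ((PySem.List.enumerate p s).foldl (fun inv pr => PySem.List.pySetD inv pr.2 pr.1) inv)
        (t : Int) d
      = match PySem.List.index? p (t : Int) with
        | some i => s + (i : Int)
        | none => PySem.List.pyGetD inv (t : Int) d := by
  induction p generalizing s inv with
  | nil => simp [PySem.List.enumerate_nil, PySem.List.index?]
  | cons x xs ih =>
    obtain ⟨m, rfl⟩ := hnn x (by simp)
    have hnd' : xs.Nodup := hnd.of_cons
    have hnn' : ∀ y ∈ xs, ∃ m : Nat, y = (m : Int) := fun y hy => hnn y (by simp [hy])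
    have ht' : t < (PySem.List.pySetD inv (m : Int) s).length := by
      simpa [PySem.List.length_pySetD] using ht
    simp only [PySem.List.enumerate_cons, List.foldl_cons]
    by_cases hmt : m = t
    · subst hmt
      have hnm : ((m : Int)) ∉ xs := by simpa using (List.nodup_cons.mp hnd).1
      have hnone : PySem.List.index? xs ((m : Int)) = none :=
        (PySem.List.index?_eq_none_iff xs _).mpr hnm
      rw [ih hnd' hnn' (s + 1) _ ht', hnone, PySem.List.index?_cons_self,
        PySem.List.pyGetD_pySetD_natCast _ m m _ _ ht]
      simp
    · have hne : ((m : Int)) ≠ ((t : Int)) := by exact_mod_cast hmt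
      rw [ih hnd' hnn' (s + 1) _ ht', PySem.List.index?_cons_of_ne xs hne]
      cases hidx : PySem.List.index? xs ((t : Int)) with
      | some i =>
        simp only [Option.map_some]
        push_cast
        ring
      | none =>
        simp only [Option.map_none]
        by_cases hm : m < inv.length
        · rw [PySem.List.pyGetD_pySetD_natCast _ m t _ _ hm, if_neg (fun h => hmt h.symm)]
        · rw [PySem.List.pySetD_natCast, List.set_eq_of_length_le (by omega)]

-- A's scatter-built inverse equals B's index-gathered inverse, for a nonneg nodup covering list
lemma pv_inv_eq (p : List Int) (n : Nat) (hlen : p.length = n) (hnd : p.Nodup)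
    (hnn : ∀ x ∈ p, ∃ m : Nat, x = (m : Int))
    (hcov : ∀ t : Nat, t < n → ((t : Int)) ∈ p) :
    pvInvPermA p
      = (PySem.List.pyRange 0 (n : Int) 1).map
          (fun j => (((PySem.List.index? p j).getD 0 : Nat) : Int)) := by
  have hlenL : (pvInvPermA p).length = n := by
    simp [pvInvPermA, pv_scatter_len, hlen]
  have hlenR : ((PySem.List.pyRange 0 (n : Int) 1).map
      (fun j => (((PySem.List.index? p j).getD 0 : Nat) : Int))).length = n := by
    simp [PySem.List.length_pyRange_one]
  apply List.ext_getElem (by rw [hlenL, hlenR])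
  intro t h1 h2
  have htn : t < n := by omega
  have hR : ((PySem.List.pyRange 0 (n : Int) 1).map
      (fun j => (((PySem.List.index? p j).getD 0 : Nat) : Int)))[t]
      = (((PySem.List.index? p (t : Int)).getD 0 : Nat) : Int) := by
    rw [List.getElem_map]
    congr 1
    rw [PySem.List.getElem_pyRange_one]
    simp
  rw [hR]
  have hget : (pvInvPermA p)[t] = PySem.List.pyGetD (pvInvPermA p) (t : Int) 0 := by
    rw [PySem.List.pyGetD_natCast, List.getD_eq_getElem _ _ (by omega)]
  rw [hget]
  unfold pvInvPermA
  rw [pv_scatter_get p hnd hnn 0 _ t (by simp [hlen]; omega) 0]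
  have hsome : (PySem.List.index? p ((t : Int))).isSome :=
    (PySem.List.index?_isSome_iff p _).mpr (hcov t htn)
  obtain ⟨i, hi⟩ := Option.isSome_iff_exists.mp hsome
  rw [hi]
  simp

-- ===== VERDICT (by name: the statement is the Claim_ definition above) =====
theorem get_transform_for_box_or_max_pool_py_spec : Claim_equal_get_transform_for_box_or_max_pool_py := by
  intro input_shape active _hdom hpre
  obtain ⟨_h3, hlen, _hcnt⟩ := hpre
  unfold Spec_get_transform_for_box_or_max_pool_py
  simp only [get_transform_for_box_or_max_pool_py, get_transform_for_box_or_max_pool_py_alt]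
  split_ifs with hcond
  · rfl
  · -- name the canonical pieces
    have hkey : ∀ k : Nat, k < active.length →
        PySem.List.pyGetD active (0 + (k : Int)) false = active[k]! := by
      intro k hk
      rw [zero_add, PySem.List.pyGetD_natCast, List.getD_eq_getElem _ _ hk,
        getElem!_pos active k hk]
    obtain ⟨hfF, hfT⟩ := pv_range_filter input_shape active 0
      (fun i => PySem.List.pyGetD active i false) hlen hkey
    rw [zero_add] at hfF hfT
    have hperm : PySem.List.sorted (PySem.List.pyRange 0 ((active.length : Int)) 1)
        (fun i => PySem.List.pyGetD active i false) false
        = (pvBsp input_shape active 0).1 ++ (pvBsp input_shape active 0).2.1 := by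
      rw [pv_boolsort, hfF, hfT]
    -- B's shape gather
    obtain ⟨hg1, hg2⟩ := pv_gather input_shape active 0
      (fun p => PySem.List.pyGetD input_shape p 0) hlen (by
        intro k hk
        have hk' : k < input_shape.length := by omega
        simp only []
        rw [zero_add, PySem.List.pyGetD_natCast, List.getD_eq_getElem _ _ hk',
          getElem!_pos input_shape k hk'])
    -- lengths and counts
    obtain ⟨hl1, hl2, hl3, hl4⟩ := pvBsp_len input_shape active 0 hlen
    have hsplit : ∀ l : List Bool, l.countP (fun a => a) + l.countP (fun a => !a) = l.length := by
      intro l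
      induction l with
      | nil => simp
      | cons a t ih => by_cases ha : a <;> simp [ha] <;> omega
    -- properties of perm = F ++ T needed for the inverse
    have hlenp : ((pvBsp input_shape active 0).1 ++ (pvBsp input_shape active 0).2.1).length
        = active.length := by
      rw [List.length_append, hl1, hl2]
      have := hsplit active
      omega
    obtain ⟨hpF, hpT⟩ := pvBsp_pairwise input_shape active 0 hlen
    have hnd : ((pvBsp input_shape active 0).1 ++ (pvBsp input_shape active 0).2.1).Nodup := by
      rw [List.nodup_append]
      refine ⟨hpF.imp ne_of_lt, hpT.imp ne_of_lt, ?_⟩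
      intro j hjF b hjT
      obtain ⟨k1, hk1, rfl, hv1⟩ := (pv_mem_idims active input_shape 0 j hlen).mp hjF
      obtain ⟨k2, hk2, rfl, hv2⟩ := (pv_mem_adims active input_shape 0 b hlen).mp hjT
      intro heq
      have : k1 = k2 := by omega
      subst this
      rw [hv1] at hv2
      exact absurd hv2 (by simp)
    have hnn : ∀ x ∈ (pvBsp input_shape active 0).1 ++ (pvBsp input_shape active 0).2.1,
        ∃ m : Nat, x = (m : Int) := by
      intro x hx
      rcases List.mem_append.mp hx with h | h
      · obtain ⟨k, hk, rfl, _⟩ := (pv_mem_idims active input_shape 0 x hlen).mp h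
        exact ⟨k, by omega⟩
      · obtain ⟨k, hk, rfl, _⟩ := (pv_mem_adims active input_shape 0 x hlen).mp h
        exact ⟨k, by omega⟩
    have hcov : ∀ t : Nat, t < active.length →
        ((t : Int)) ∈ (pvBsp input_shape active 0).1 ++ (pvBsp input_shape active 0).2.1 := by
      intro t ht
      by_cases hat : active[t] = true
      · exact List.mem_append.mpr (Or.inr
          ((pv_mem_adims active input_shape 0 _ hlen).mpr ⟨t, ht, by simp, hat⟩))
      · exact List.mem_append.mpr (Or.inl
          ((pv_mem_idims active input_shape 0 _ hlen).mpr
            ⟨t, ht, by simp, by simpa using hat⟩))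
    have hinv := pv_inv_eq _ active.length hlenp hnd hnn hcov
    -- k = len(inactive_shape)
    have hk : ((active.length : Int)) - (active.map (fun a => if a then (1 : Int) else 0)).sum
        = (((pvBsp input_shape active 0).2.2.1.length : Nat) : Int) := by
      rw [PySem.List.sum_map_ite_one_zero (fun a => a) active, hl3]
      have := hsplit active
      omega
    -- A's contains-driven shape comprehensions
    have hc1 : ∀ k : Nat, k < active.length →
        (!((pvBsp input_shape active 0).2.1.contains ((0 : Int) + k))) = !active[k]! := by
      intro k hk
      rw [pv_contains_adims active input_shape 0 k hlen hk, getElem!_pos active k hk]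
    have hc2 : ∀ k : Nat, k < active.length →
        ((pvBsp input_shape active 0).2.1.contains ((0 : Int) + k)) = active[k]! := by
      intro k hk
      rw [pv_contains_adims active input_shape 0 k hlen hk, getElem!_pos active k hk]
    -- assemble
    rw [pvA_adims input_shape active 0 hlen, pvA_idims input_shape active 0 hlen,
      pvA_ish input_shape active 0
        (fun i => !((pvBsp input_shape active 0).2.1.contains i)) hlen hc1,
      pvA_ash input_shape active 0
        (fun i => ((pvBsp input_shape active 0).2.1.contains i)) hlen hc2,
      hperm, hinv, List.map_append, hg1, hg2, hk,
      PySem.List.slice_to_natCast, PySem.List.slice_from_natCast,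
      List.take_left, List.drop_left]
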